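-- pv_equiv track=rewrite | github.com/royadityak94/Interview | Gramma_Tech/moving_desired_element.py | move_to_front
-- ===== SOURCE A (Python) =====
-- def move_to_front(arr, ele):
--     i = j = len(arr) - 1
--
--     while j >= 0:
--         if arr[j] != ele:
--             arr[i] = arr[j]
--             i, j = i-1, j-1
--         else:
--             j -= 1
--
--     # Current 'i' points to the first occurrence of 'ele' from right
--     while i >= 0:
--         arr[i] = ele
--         i -= 1
--
--     return arr
-- ===== SOURCE B (Python) =====
-- def move_to_front(arr, ele):
--     others = [x for x in arr if x != ele]
--     count = len(arr) - len(others)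
--     arr[:] = [ele] * count + others
--     return arr
-- ===== Notes on version B (the rewrite author's own statement) =====
-- stated objective: simpler
-- what changed: Replaced A's backward two-pointer in-place compaction (two while loops writing through mutating indices) with a single forward filter plus one concatenation: others = [x for x in arr if x != ele]; arr[:] = [ele]*(len(arr)-len(others)) + others.
import Mathlib
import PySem

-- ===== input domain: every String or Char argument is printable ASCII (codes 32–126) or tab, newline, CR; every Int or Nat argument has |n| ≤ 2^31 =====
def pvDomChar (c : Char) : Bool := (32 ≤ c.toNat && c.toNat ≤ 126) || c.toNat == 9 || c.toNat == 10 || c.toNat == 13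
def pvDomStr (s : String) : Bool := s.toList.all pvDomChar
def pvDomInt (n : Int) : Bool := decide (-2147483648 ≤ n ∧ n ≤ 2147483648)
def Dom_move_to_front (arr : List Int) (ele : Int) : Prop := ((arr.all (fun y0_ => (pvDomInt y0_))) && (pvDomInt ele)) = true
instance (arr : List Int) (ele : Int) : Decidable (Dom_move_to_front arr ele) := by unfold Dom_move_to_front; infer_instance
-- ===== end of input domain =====

-- B replaces A's backward two-pointer in-place compaction with a filter plus one
-- concatenation (objective: simpler). Both Pythons mutate `arr` in place identically
-- (B via slice assignment); the theorems below are about the returned value.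

-- ===== PORT A =====
-- first while loop: compacts non-ele elements to the back, walking j (and i) down.
-- fuel only makes the recursion structural: j sinks by 1 each iteration, so
-- fuel = arr.length ≥ j+1 iterations is never exhausted before the guard 0 ≤ j fails.
def mtfLoop1 (ele : Int) (arr : List Int) (i j : Int) : Nat → List Int × Int
  | 0 => (arr, i)
  | fuel + 1 =>
    if 0 ≤ j then
      if PySem.List.pyGetD arr j 0 != ele then
        -- arr[i] = arr[j]; i, j = i-1, j-1   (i, j are in range here: 0 ≤ j ≤ i < len)
        mtfLoop1 ele (PySem.List.pySetD arr i (PySem.List.pyGetD arr j 0)) (i - 1) (j - 1) fuel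
      else
        mtfLoop1 ele arr i (j - 1) fuel
    else (arr, i)

-- second while loop: arr[i] = ele; i -= 1  (same fuel device, i sinks by 1 each iteration)
def mtfLoop2 (ele : Int) (arr : List Int) (i : Int) : Nat → List Int
  | 0 => arr
  | fuel + 1 =>
    if 0 ≤ i then
      mtfLoop2 ele (PySem.List.pySetD arr i ele) (i - 1) fuel
    else arr

def move_to_front (arr : List Int) (ele : Int) : List Int :=
  let ij := ((arr.length : Int) - 1, (arr.length : Int) - 1)
  let s := mtfLoop1 ele arr ij.1 ij.2 arr.length
  mtfLoop2 ele s.1 s.2 arr.length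

-- ===== PORT B =====
def move_to_front_alt (arr : List Int) (ele : Int) : List Int :=
  let others := arr.filter (fun x => x != ele)
  let count := arr.length - others.length
  List.replicate count ele ++ others

-- ===== PRECONDITION & SPEC =====
def Spec_move_to_front (arr : List Int) (ele : Int) (out : List Int) : Prop := out = move_to_front_alt arr ele
instance (arr : List Int) (ele : Int) (out : List Int) : Decidable (Spec_move_to_front arr ele out) := by unfold Spec_move_to_front; infer_instance

-- ===== CLAIM (what is proved, stated in full; the proofs are below) =====
def Claim_equal_move_to_front : Prop := ∀ (arr : List Int) (ele : Int), Dom_move_to_front arr ele → Spec_move_to_front arr ele (move_to_front arr ele)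

-- ===== LEMMAS AND PROOFS =====

-- setting the last element of a nonempty list
lemma set_last_eq (x : Int) (mid : List Int) (v : Int) :
    (x :: mid).set mid.length v = (x :: mid).dropLast ++ [v] := by
  induction mid generalizing x with
  | nil => simp
  | cons y ys ih => simp [ih y]

lemma mtfLoop2_spec (ele : Int) : ∀ (fuel k : Nat) (arr : List Int), k ≤ arr.length → k ≤ fuel →
    mtfLoop2 ele arr ((k : Int) - 1) fuel = List.replicate k ele ++ arr.drop k := by
  intro fuel
  induction fuel with
  | zero =>
    intro k arr _ hkf
    interval_cases k
    simp [mtfLoop2]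
  | succ fuel ih =>
    intro k arr hk hkf
    match k with
    | 0 => rw [mtfLoop2]; simp
    | k + 1 =>
    rw [mtfLoop2]
    have h0 : (0:Int) ≤ (k+1:Nat) - 1 := by push_cast; omega
    rw [if_pos h0]
    have hcast : ((k+1:Nat) : Int) - 1 = ((k : Nat) : Int) := by push_cast; ring
    rw [hcast, PySem.List.pySetD_natCast]
    have hklt : k < arr.length := by omega
    rw [ih k (arr.set k ele) (by simp; omega) (by omega)]
    have hdrop : (arr.set k ele).drop k = ele :: arr.drop (k+1) := by
      have h1 : arr.drop k = arr[k] :: arr.drop (k+1) := List.drop_eq_getElem_cons hklt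
      calc (arr.set k ele).drop k = (arr.drop k).set 0 ele := by
            rw [List.drop_set]; simp
        _ = ele :: arr.drop (k+1) := by rw [h1, List.set_cons_zero]
    rw [hdrop, List.replicate_succ']
    simp

lemma mtfLoop1_base (ele : Int) (arr : List Int) (i : Int) (fuel : Nat) :
    mtfLoop1 ele arr i (-1) fuel = (arr, i) := by
  cases fuel with
  | zero => rw [mtfLoop1]
  | succ fuel => rw [mtfLoop1]; simp

lemma mtfLoop1_spec (ele : Int) (orig : List Int) : ∀ (fuel jn : Nat) (mid : List Int),
    jn ≤ fuel →
    jn + mid.length + ((orig.drop jn).filter (fun x => x != ele)).length = orig.length →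
    ∃ mid' : List Int,
      mid'.length + (orig.filter (fun x => x != ele)).length = orig.length ∧
      mtfLoop1 ele (orig.take jn ++ mid ++ (orig.drop jn).filter (fun x => x != ele))
        ((jn : Int) + mid.length - 1) ((jn : Int) - 1) fuel
      = (mid' ++ orig.filter (fun x => x != ele), (mid'.length : Int) - 1) := by
  intro fuel
  induction fuel with
  | zero =>
    intro jn mid hjf hlen
    interval_cases jn
    exact ⟨mid, by simpa using hlen, by simpa using mtfLoop1_base ele _ _ 0⟩
  | succ fuel ih =>
    intro jn mid hjf hlen
    match jn with
    | 0 => exact ⟨mid, by simpa using hlen, by simpa using mtfLoop1_base ele _ _ (fuel+1)⟩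
    | k + 1 =>
    have hklt : k < orig.length := by omega
    have hj0 : (0:Int) ≤ ((k+1:Nat) : Int) - 1 := by push_cast; omega
    have hjcast : ((k+1:Nat) : Int) - 1 = ((k : Nat) : Int) := by push_cast; ring
    have htake : orig.take (k+1) = orig.take k ++ [orig[k]] := by
      rw [List.take_add_one]; simp [hklt]
    have hdropk : orig.drop k = orig[k] :: orig.drop (k+1) := List.drop_eq_getElem_cons hklt
    -- the current array, regrouped around index k
    set Fd := (orig.drop (k+1)).filter (fun x => x != ele) with hFd
    have hcur : orig.take (k+1) ++ mid ++ Fd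
        = orig.take k ++ ((orig[k] :: mid) ++ Fd) := by
      rw [htake]; simp only [List.append_assoc, List.cons_append, List.nil_append]
    -- the value read at index k
    have hlenP : (orig.take k).length = k := by simp; omega
    have hget : PySem.List.pyGetD (orig.take (k+1) ++ mid ++ Fd) ((k:Nat) : Int) 0 = orig[k] := by
      rw [hcur, PySem.List.pyGetD_natCast, List.getD_eq_getElem?_getD,
          List.getElem?_append_right (by omega), hlenP]
      simp
    rw [mtfLoop1, if_pos hj0, hjcast, hget]
    by_cases hne : orig[k] != ele
    · -- arr[j] != ele : write orig[k] at position i = k + mid.length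
      rw [if_pos hne]
      have hicast : ((k+1:Nat) : Int) + mid.length - 1 = (((k + mid.length : Nat)) : Int) := by
        push_cast; ring
      rw [hicast, PySem.List.pySetD_natCast]
      have hset : (orig.take (k+1) ++ mid ++ Fd).set (k + mid.length) orig[k]
          = orig.take k ++ ((orig[k] :: mid).dropLast ++ (orig[k] :: Fd)) := by
        rw [hcur, List.set_append, if_neg (by rw [hlenP]; omega), hlenP]
        have : k + mid.length - k = mid.length := by omega
        rw [this, List.set_append, if_pos (by simp), set_last_eq]
        simp
      rw [hset]
      have hF : (orig.drop k).filter (fun x => x != ele) = orig[k] :: Fd := by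
        rw [hdropk, List.filter_cons, if_pos hne]
      have hmidlen : ((orig[k] :: mid).dropLast).length = mid.length := by simp
      have happ : orig.take k ++ ((orig[k] :: mid).dropLast ++ (orig[k] :: Fd))
          = orig.take k ++ (orig[k] :: mid).dropLast ++ (orig.drop k).filter (fun x => x != ele) := by
        rw [hF]; simp
      rw [happ]
      have hi' : (((k + mid.length : Nat)) : Int) - 1
          = ((k:Nat) : Int) + ((orig[k] :: mid).dropLast).length - 1 := by
        rw [hmidlen]; push_cast; ring
      rw [hi']
      exact ih k ((orig[k] :: mid).dropLast) (by omega)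
        (by rw [hmidlen, hF]; simp at hlen ⊢; omega)
    · -- arr[j] == ele : only j moves; orig[k] joins the junk middle block
      rw [if_neg hne]
      have hF : (orig.drop k).filter (fun x => x != ele) = Fd := by
        rw [hdropk, List.filter_cons, if_neg hne]
      have happ : orig.take (k+1) ++ mid ++ Fd
          = orig.take k ++ (orig[k] :: mid) ++ (orig.drop k).filter (fun x => x != ele) := by
        rw [hcur, hF]; simp
      rw [happ]
      have hi' : ((k+1:Nat):Int) + mid.length - 1
          = ((k:Nat) : Int) + (orig[k] :: mid).length - 1 := by push_cast; simp; ring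
      rw [hi']
      exact ih k (orig[k] :: mid) (by omega) (by rw [hF]; simp at hlen ⊢; omega)

-- ===== VERDICT (by name: the statement is the Claim_ definition above) =====
theorem move_to_front_spec : Claim_equal_move_to_front := by
  intro arr ele _
  unfold Spec_move_to_front move_to_front move_to_front_alt
  obtain ⟨mid', hlen, heq⟩ := mtfLoop1_spec ele arr arr.length arr.length []
    (le_refl _) (by simp)
  have hinit : arr.take arr.length ++ [] ++ (arr.drop arr.length).filter (fun x => x != ele)
      = arr := by simp
  have hij : ((arr.length : Nat) : Int) + ([] : List Int).length - 1 = (arr.length : Int) - 1 := by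
    simp
  rw [hinit, hij] at heq
  simp only [heq]
  rw [mtfLoop2_spec ele arr.length mid'.length (mid' ++ arr.filter (fun x => x != ele)) (by simp) (by omega)]
  have hdrop : (mid' ++ arr.filter (fun x => x != ele)).drop mid'.length
      = arr.filter (fun x => x != ele) := by simp
  rw [hdrop]
  have : mid'.length = arr.length - (arr.filter (fun x => x != ele)).length := by omega
  rw [this]
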